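-- pv_equiv track=rewrite | github.com/Bargota/AvitoParser | BaseParser.py | _SortRepeat
-- ===== SOURCE A (Python) =====
-- def _SortRepeat(list):
--     list=sorted(list,key= lambda d: d['address'])
--     final_list=[]
--     for i in range(len(list)):
--         if i==0:
--             final_list.append(list[i])
--         else:
--             if list[i]['address']!=final_list[-1]['address']:
--                 final_list.append(list[i])
--     return final_list
-- ===== SOURCE B (Python) =====
-- def _SortRepeat(list):
--     seen = {}
--     for d in list:
--         a = d['address']
--         if a not in seen:
--             seen[a] = d
--     return sorted(seen.values(), key=lambda d: d['address'])
-- ===== Notes on version B (the rewrite author's own statement) =====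
-- stated objective: simpler
-- what changed: B deduplicates first by a single dict pass keyed on address (keeping the first item seen per address) and then sorts the kept values, instead of A's sort-everything-first followed by an index-based adjacent-duplicate scan comparing against final_list[-1].
import Mathlib
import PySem

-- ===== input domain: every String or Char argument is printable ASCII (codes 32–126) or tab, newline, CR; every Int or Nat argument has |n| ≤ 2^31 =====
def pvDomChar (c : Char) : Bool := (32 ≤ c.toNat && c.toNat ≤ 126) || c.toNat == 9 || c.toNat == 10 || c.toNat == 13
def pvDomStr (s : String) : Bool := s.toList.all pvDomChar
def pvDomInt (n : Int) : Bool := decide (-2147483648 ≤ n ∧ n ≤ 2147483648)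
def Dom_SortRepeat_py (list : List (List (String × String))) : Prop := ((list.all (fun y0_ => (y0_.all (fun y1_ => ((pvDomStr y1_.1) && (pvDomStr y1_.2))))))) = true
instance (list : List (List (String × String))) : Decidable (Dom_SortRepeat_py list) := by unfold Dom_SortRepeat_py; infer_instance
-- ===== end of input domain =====

-- B deduplicates by a dict keyed on address (first occurrence kept) and then sorts the values,
-- instead of A's sort-first-then-adjacent-scan; same return value, no speed claim.


-- ===== PORT A =====
-- d['address']; Pre_ guarantees the key is present, so getD "" never supplies its default
def pvAddr (d : List (String × String)) : String :=
  ((PySem.Dict.mk d).get? "address").getD ""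

def SortRepeat_py (list : List (List (String × String))) : List (List (String × String)) :=
  let l := PySem.List.sorted list (fun d => pvAddr d) false
  (PySem.List.pyRange 0 (PySem.List.len l)).foldl
    (fun fl i =>
      if i = 0 then fl ++ [PySem.List.pyGetD l i []]
      else
        if pvAddr (PySem.List.pyGetD l i []) ≠ pvAddr (PySem.List.pyGetD fl (-1) []) then
          fl ++ [PySem.List.pyGetD l i []]
        else fl)
    []

-- ===== PORT B =====
def SortRepeat_py_alt (list : List (List (String × String))) : List (List (String × String)) :=
  let seen := list.foldl
    (fun s d =>
      let a := pvAddr d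
      if s.contains a then s else s.insert a d)
    (PySem.Dict.empty : PySem.Dict String (List (String × String)))
  PySem.List.sorted seen.values (fun d => pvAddr d) false

-- ===== PRECONDITION & SPEC =====
-- Pre_ excludes inputs where d['address'] raises KeyError, and association lists with a duplicated
-- key inside one element, which do not represent a Python dict (a dict cannot hold duplicate keys).
def Pre_SortRepeat_py (list : List (List (String × String))) : Prop :=
  ∀ d ∈ list, ((PySem.Dict.mk d).get? "address").isSome = true ∧ (d.map Prod.fst).Nodup
instance (list : List (List (String × String))) : Decidable (Pre_SortRepeat_py list) := by
  unfold Pre_SortRepeat_py; infer_instance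

def pvWitness_SortRepeat_py : (List (List (String × String))) :=
  ([[("address", "b"), ("id", "2")], [("address", "a")], [("address", "b"), ("id", "7")]])

def Spec_SortRepeat_py (list : List (List (String × String))) (out : List (List (String × String))) : Prop := out = SortRepeat_py_alt list
instance (list : List (List (String × String))) (out : List (List (String × String))) : Decidable (Spec_SortRepeat_py list out) := by unfold Spec_SortRepeat_py; infer_instance

-- ===== CLAIM (what is proved, stated in full; the proofs are below) =====
def Claim_equal_SortRepeat_py : Prop := ∀ (list : List (List (String × String))), Dom_SortRepeat_py list → Pre_SortRepeat_py list → Spec_SortRepeat_py list (SortRepeat_py list)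

-- ===== LEMMAS AND PROOFS =====

-- first item per address, in order of first appearance, skipping addresses already in sk
def pvReps (sk : List String) : List (List (String × String)) → List (List (String × String))
  | [] => []
  | d :: t => if pvAddr d ∈ sk then pvReps sk t else d :: pvReps (pvAddr d :: sk) t

-- A's adjacent-duplicate scan, carrying the previously kept element
def pvGo (p : List (String × String)) : List (List (String × String)) → List (List (String × String))
  | [] => []
  | x :: t => if pvAddr x ≠ pvAddr p then x :: pvGo x t else pvGo p t

theorem pvReps_congr (l : List (List (String × String))) (sk sk' : List String)
    (h : ∀ a, a ∈ sk ↔ a ∈ sk') : pvReps sk l = pvReps sk' l := by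
  induction l generalizing sk sk' with
  | nil => rfl
  | cons d t ih =>
    by_cases hm : pvAddr d ∈ sk
    · simp [pvReps, hm, (h _).1 hm, ih _ _ h]
    · have hm' : pvAddr d ∉ sk' := fun hx => hm ((h _).2 hx)
      simp only [pvReps, if_neg hm, if_neg hm']
      exact congrArg _ (ih _ _ (by intro a; simp [h a]))

theorem pvValues_foldl (xs : List (List (String × String))) (s : PySem.Dict String (List (String × String))) :
    PySem.Dict.values (xs.foldl (fun s d =>
      if s.contains (pvAddr d) then s else s.insert (pvAddr d) d) s) =
    PySem.Dict.values s ++ pvReps (PySem.Dict.keys s) xs := by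
  induction xs generalizing s with
  | nil => simp [pvReps]
  | cons d t ih =>
    rw [List.foldl_cons]
    by_cases hc : s.contains (pvAddr d) = true
    · have hk : pvAddr d ∈ s.keys := (PySem.Dict.contains_iff_mem_keys s _).1 hc
      rw [if_pos hc, ih]
      simp [pvReps, hk]
    · have hk : pvAddr d ∉ s.keys := fun hx => hc ((PySem.Dict.contains_iff_mem_keys s _).2 hx)
      have hins : s.insert (pvAddr d) d = PySem.Dict.mk (s.items ++ [(pvAddr d, d)]) := by
        simp [PySem.Dict.insert, hc]
      rw [if_neg hc, hins, ih]
      have hv : (PySem.Dict.mk (s.items ++ [(pvAddr d, d)])).values = s.values ++ [d] := by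
        simp [PySem.Dict.values]
      have hky : (PySem.Dict.mk (s.items ++ [(pvAddr d, d)])).keys = s.keys ++ [pvAddr d] := by
        simp [PySem.Dict.keys]
      rw [hv, hky, show pvReps s.keys (d :: t) = d :: pvReps (pvAddr d :: s.keys) t from by
        simp [pvReps, hk], List.append_assoc]
      refine congrArg _ ?_
      refine congrArg _ (pvReps_congr t _ _ ?_)
      intro a; simp [or_comm]

theorem pvAlt_eq (list : List (List (String × String))) :
    SortRepeat_py_alt list = PySem.List.sorted (pvReps [] list) (fun d => pvAddr d) false := by
  simp only [SortRepeat_py_alt]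
  rw [pvValues_foldl]
  simp [PySem.Dict.values, PySem.Dict.keys, PySem.Dict.empty]

theorem pvGetD_last (ys : List (List (String × String))) (p : List (String × String)) :
    PySem.List.pyGetD (ys ++ [p]) (-1) [] = p := by
  simp [PySem.List.pyGetD, PySem.List.pyGet?, PySem.List.pyIdx?]

theorem pvFoldl_go (t : List (List (String × String))) (ys : List (List (String × String))) (p : List (String × String)) :
    t.foldl (fun fl y =>
      if pvAddr y ≠ pvAddr (PySem.List.pyGetD fl (-1) []) then fl ++ [y] else fl) (ys ++ [p]) =
    (ys ++ [p]) ++ pvGo p t := by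
  induction t generalizing ys p with
  | nil => simp [pvGo]
  | cons x t ih =>
    simp only [List.foldl_cons, pvGetD_last]
    by_cases hx : pvAddr x ≠ pvAddr p
    · rw [if_pos hx, show ys ++ [p] ++ [x] = (ys ++ [p]) ++ [x] from rfl, ih]
      simp [pvGo, hx]
    · rw [if_neg hx, ih]
      simp [pvGo, hx]

theorem pvA_eq (list : List (List (String × String))) :
    SortRepeat_py list = pvReps [] (PySem.List.sorted list (fun d => pvAddr d) false) := by
  simp only [SortRepeat_py]
  cases hl : PySem.List.sorted list (fun d => pvAddr d) false with
  | nil =>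
    rw [show PySem.List.len ([] : List (List (String × String))) = 0 from rfl,
      PySem.List.pyRange_one_eq_nil le_rfl]
    rfl
  | cons x t =>
    have h0 : (0 : Int) < PySem.List.len (x :: t) := by
      simp [PySem.List.len]
    rw [PySem.List.pyRange_one_cons h0, List.foldl_cons]
    rw [show (if (0 : Int) = 0 then ([] : List (List (String × String))) ++ [PySem.List.pyGetD (x :: t) 0 []]
        else if pvAddr (PySem.List.pyGetD (x :: t) 0 []) ≠ pvAddr (PySem.List.pyGetD ([] : List (List (String × String))) (-1) []) then
          [] ++ [PySem.List.pyGetD (x :: t) 0 []] else []) = [x] from by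
      simp [PySem.List.pyGetD, PySem.List.pyGet?, PySem.List.pyIdx?]]
    rw [PySem.List.foldl_congr_mem _ _
      (fun fl i => if pvAddr (PySem.List.pyGetD (x :: t) i []) ≠ pvAddr (PySem.List.pyGetD fl (-1) []) then
          fl ++ [PySem.List.pyGetD (x :: t) i []] else fl) _
      (by
        intro acc i hi
        have h1 : (1 : Int) ≤ i := (PySem.List.mem_pyRange_one.1 hi).1
        rw [if_neg (by omega)])]
    rw [PySem.List.foldl_pyRange_pyGetD (x :: t) []
      (fun fl y => if pvAddr y ≠ pvAddr (PySem.List.pyGetD fl (-1) []) then fl ++ [y] else fl)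
      [x] (by norm_num)]
    rw [show List.drop ((0 : Int) + 1).toNat (x :: t) = t from by norm_num]
    rw [show ([x] : List (List (String × String))) = [] ++ [x] from rfl, pvFoldl_go]
    have hpw : (x :: t).Pairwise (fun a b => pvAddr a ≤ pvAddr b) := by
      rw [← hl]; exact PySem.List.sorted_pairwise list (fun d => pvAddr d)
    rcases List.pairwise_cons.1 hpw with ⟨hx, hpw'⟩
    rw [pvGo_eq_reps t x [pvAddr x] hx hpw' (by simp) (by simp)]
    simp [pvReps]
where
  pvGo_eq_reps (t : List (List (String × String))) (p : List (String × String)) (sk : List String)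
      (hall : ∀ y ∈ t, pvAddr p ≤ pvAddr y)
      (hpw : t.Pairwise (fun a b => pvAddr a ≤ pvAddr b))
      (hmem : pvAddr p ∈ sk) (hle : ∀ a ∈ sk, a ≤ pvAddr p) :
      pvGo p t = pvReps sk t := by
    induction t generalizing p sk with
    | nil => rfl
    | cons x t ih =>
      have hpx : pvAddr p ≤ pvAddr x := hall x (by simp)
      rcases List.pairwise_cons.1 hpw with ⟨hx, hpw'⟩
      by_cases he : pvAddr x = pvAddr p
      · have hne : ¬ pvAddr x ≠ pvAddr p := by simpa using he
        rw [pvGo, if_neg hne, pvReps, if_pos (he ▸ hmem)]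
        exact ih p sk (fun y hy => le_trans hpx (he ▸ hx y hy)) hpw' hmem hle
      · have hlt : pvAddr p < pvAddr x := lt_of_le_of_ne hpx (Ne.symm he)
        have hnot : pvAddr x ∉ sk := fun hxk => absurd (hle _ hxk) (not_le.2 hlt)
        rw [pvGo, if_pos he, pvReps, if_neg hnot]
        refine congrArg _ (ih x (pvAddr x :: sk) hx hpw' (by simp) ?_)
        intro a ha
        rcases List.mem_cons.1 ha with h | h
        · exact le_of_eq h
        · exact le_trans (hle a h) (le_of_lt hlt)

theorem pvStability_insert (ys : List (List (String × String))) (x : List (String × String)) (k : String)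
    (hpw : ys.Pairwise (fun a b => pvAddr a ≤ pvAddr b)) :
    (PySem.List.insertBy (fun a b => decide (pvAddr a < pvAddr b)) x ys).filter (fun d => decide (pvAddr d = k)) =
    if pvAddr x = k then ys.filter (fun d => decide (pvAddr d = k)) ++ [x]
    else ys.filter (fun d => decide (pvAddr d = k)) := by
  induction ys with
  | nil =>
    by_cases hxk : pvAddr x = k <;> simp [PySem.List.insertBy, hxk]
  | cons y ys ih =>
    rcases List.pairwise_cons.1 hpw with ⟨hy, hpw'⟩
    by_cases hb : pvAddr x < pvAddr y
    · rw [show PySem.List.insertBy (fun a b => decide (pvAddr a < pvAddr b)) x (y :: ys) = x :: y :: ys from by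
        simp [PySem.List.insertBy, hb]]
      by_cases hxk : pvAddr x = k
      · have hnil : (y :: ys).filter (fun d => decide (pvAddr d = k)) = [] := by
          rw [List.filter_eq_nil_iff]
          intro z hz
          have hyz : pvAddr y ≤ pvAddr z := by
            rcases List.mem_cons.1 hz with rfl | hz'
            · exact le_rfl
            · exact hy z hz'
          simp only [decide_eq_true_eq]
          intro hzk
          exact absurd (lt_of_lt_of_le hb hyz) (by rw [hzk, hxk]; exact lt_irrefl k)
        rw [List.filter_cons_of_pos (by simp [hxk]), hnil, if_pos hxk]
        simp
      · rw [List.filter_cons_of_neg (by simp [hxk]), if_neg hxk]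
    · rw [show PySem.List.insertBy (fun a b => decide (pvAddr a < pvAddr b)) x (y :: ys) =
          y :: PySem.List.insertBy (fun a b => decide (pvAddr a < pvAddr b)) x ys from by
        simp [PySem.List.insertBy, hb]]
      rw [List.filter_cons, ih hpw', List.filter_cons]
      by_cases hyk : pvAddr y = k <;> by_cases hxk : pvAddr x = k <;>
        simp [hyk, hxk]

theorem pvStability (xs : List (List (String × String))) (k : String) :
    (PySem.List.sorted xs (fun d => pvAddr d) false).filter (fun d => decide (pvAddr d = k)) =
    xs.filter (fun d => decide (pvAddr d = k)) := by
  induction xs using List.reverseRecOn with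
  | nil => rfl
  | append_singleton xs x ih =>
    have hs : PySem.List.sorted (xs ++ [x]) (fun d => pvAddr d) false =
        PySem.List.insertBy (fun a b => decide (pvAddr a < pvAddr b)) x
          (PySem.List.sorted xs (fun d => pvAddr d) false) := by
      rw [PySem.List.sorted_eq_foldl_insertBy, List.foldl_append,
        ← PySem.List.sorted_eq_foldl_insertBy]
      rfl
    rw [hs, pvStability_insert _ _ _ (PySem.List.sorted_pairwise xs (fun d => pvAddr d)),
      List.filter_append]
    by_cases hxk : pvAddr x = k <;> simp [hxk, ih]

theorem pvMem_reps (l : List (List (String × String))) (sk : List String) (d : List (String × String)) :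
    d ∈ pvReps sk l ↔
      pvAddr d ∉ sk ∧ (l.filter (fun e => decide (pvAddr e = pvAddr d))).head? = some d := by
  induction l generalizing sk with
  | nil => simp [pvReps]
  | cons x t ih =>
    by_cases hm : pvAddr x ∈ sk
    · rw [pvReps, if_pos hm, ih]
      by_cases he : pvAddr x = pvAddr d
      · constructor <;> (rintro ⟨h1, h2⟩; exact absurd (he ▸ hm) h1)
      · rw [List.filter_cons_of_neg (by simp [he])]
    · rw [pvReps, if_neg hm]
      by_cases he : pvAddr x = pvAddr d
      · rw [List.filter_cons_of_pos (by simp [he]), List.head?_cons]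
        constructor
        · rintro hmem
          rcases List.mem_cons.1 hmem with rfl | hmem'
          · exact ⟨he ▸ hm, rfl⟩
          · rcases (ih _).1 hmem' with ⟨h1, _⟩
            exact absurd (by simp [← he]) h1
        · rintro ⟨_, h2⟩
          exact List.mem_cons.2 (Or.inl (Option.some_injective _ h2).symm)
      · rw [List.filter_cons_of_neg (by simp [he])]
        constructor
        · intro hmem
          rcases List.mem_cons.1 hmem with rfl | hmem'
          · exact absurd rfl he
          · rcases (ih _).1 hmem' with ⟨h1, h2⟩
            exact ⟨fun hx => h1 (List.mem_cons.2 (Or.inr hx)), h2⟩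
        · rintro ⟨h1, h2⟩
          refine List.mem_cons.2 (Or.inr ((ih _).2 ⟨?_, h2⟩))
          intro hx
          rcases List.mem_cons.1 hx with hx' | hx'
          · exact he hx'.symm
          · exact h1 hx'

theorem pvReps_keys_nodup (l : List (List (String × String))) (sk : List String) :
    ((pvReps sk l).map pvAddr).Nodup ∧ ∀ a ∈ (pvReps sk l).map pvAddr, a ∉ sk := by
  induction l generalizing sk with
  | nil => simp [pvReps]
  | cons x t ih =>
    by_cases hm : pvAddr x ∈ sk
    · simpa [pvReps, hm] using ih sk
    · rcases ih (pvAddr x :: sk) with ⟨hnd, hnin⟩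
      refine ⟨?_, ?_⟩
      · simp only [pvReps, if_neg hm, List.map_cons, List.nodup_cons]
        exact ⟨fun hx => (hnin _ hx) (by simp), hnd⟩
      · intro a ha
        simp only [pvReps, if_neg hm, List.map_cons, List.mem_cons] at ha
        rcases ha with rfl | ha
        · exact hm
        · exact fun hx => hnin a ha (by simp [hx])

theorem pvReps_sublist (l : List (List (String × String))) (sk : List String) :
    (pvReps sk l).Sublist l := by
  induction l generalizing sk with
  | nil => simp [pvReps]
  | cons x t ih =>
    by_cases hm : pvAddr x ∈ sk
    · exact (by simpa [pvReps, hm] using (ih sk).cons x)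
    · simpa [pvReps, hm] using (ih (pvAddr x :: sk)).cons₂ x

-- ===== VERDICT (by name: the statement is the Claim_ definition above) =====
theorem SortRepeat_py_spec : Claim_equal_SortRepeat_py := by
  intro list _ _
  unfold Spec_SortRepeat_py
  rw [pvA_eq, pvAlt_eq]
  have hsub := pvReps_sublist (PySem.List.sorted list (fun d => pvAddr d) false) []
  have hle : (pvReps [] (PySem.List.sorted list (fun d => pvAddr d) false)).Pairwise
      (fun a b => pvAddr a ≤ pvAddr b) :=
    (PySem.List.sorted_pairwise list (fun d => pvAddr d)).sublist hsub
  have hnd1 := (pvReps_keys_nodup (PySem.List.sorted list (fun d => pvAddr d) false) []).1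
  have hnd2 := (pvReps_keys_nodup list []).1
  have hne : (pvReps [] (PySem.List.sorted list (fun d => pvAddr d) false)).Pairwise
      (fun a b => pvAddr a ≠ pvAddr b) := List.pairwise_map.1 hnd1
  have hpair : (pvReps [] (PySem.List.sorted list (fun d => pvAddr d) false)).Pairwise
      (fun a b => pvAddr a < pvAddr b) :=
    (hle.and hne).imp fun h => lt_of_le_of_ne h.1 h.2
  have hperm : (pvReps [] (PySem.List.sorted list (fun d => pvAddr d) false)).Perm
      (pvReps [] list) := by
    rw [List.perm_ext_iff_of_nodup (hnd1.of_map) (hnd2.of_map)]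
    intro d
    rw [pvMem_reps, pvMem_reps, pvStability]
  exact (PySem.List.sorted_eq_of_perm_of_pairwise_lt _ _ _ hperm hpair).symm
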